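-- pv_equiv track=rewrite | github.com/jennyzzt/LLM_debate_on_ARC | ARC_gen_agents2_rounds2_openai/b2862040/agent1/algo.py | solve
-- ===== SOURCE A (Python) =====
-- def solve(input_grid):
--     rows = len(input_grid)
--     cols = len(input_grid[0])
--     output_grid = [row[:] for row in input_grid]  # Create a copy of the input grid.
--
--     # Helper function to check if a cell is part of a horizontal or vertical line of '1's.
--     def is_part_of_line(r, c):
--         horizontal = (c > 0 and input_grid[r][c-1] == 1) or (c < cols - 1 and input_grid[r][c+1] == 1)
--         vertical = (r > 0 and input_grid[r-1][c] == 1) or (r < rows - 1 and input_grid[r+1][c] == 1)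
--         return horizontal or vertical
--
--     # Iterate through the grid and transform '1's to '8's where applicable.
--     for r in range(rows):
--         for c in range(cols):
--             if input_grid[r][c] == 1 and is_part_of_line(r, c):
--                 output_grid[r][c] = 8
--
--     return output_grid
-- ===== SOURCE B (Python) =====
-- def solve(input_grid):
--     rows = len(input_grid)
--     cols = len(input_grid[0])
--     out = [row[:] for row in input_grid]
--     # Horizontal pass: mark both cells of each horizontally adjacent pair of 1's.
--     for r in range(rows):
--         for c in range(cols - 1):
--             if input_grid[r][c] == 1 and input_grid[r][c + 1] == 1:
--                 out[r][c] = 8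
--                 out[r][c + 1] = 8
--     # Vertical pass: mark both cells of each vertically adjacent pair of 1's.
--     for r in range(rows - 1):
--         for c in range(cols):
--             if input_grid[r][c] == 1 and input_grid[r + 1][c] == 1:
--                 out[r][c] = 8
--                 out[r + 1][c] = 8
--     return out
-- ===== Notes on version B (the rewrite author's own statement) =====
-- stated objective: alternative
-- what changed: Replaced the per-cell four-neighbour test (helper is_part_of_line consulted for every cell) by two edge sweeps: a horizontal pass over adjacent pairs (r,c)-(r,c+1) and a vertical pass over pairs (r,c)-(r+1,c), marking both endpoints of every all-1 pair in the output copy.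
import Mathlib
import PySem

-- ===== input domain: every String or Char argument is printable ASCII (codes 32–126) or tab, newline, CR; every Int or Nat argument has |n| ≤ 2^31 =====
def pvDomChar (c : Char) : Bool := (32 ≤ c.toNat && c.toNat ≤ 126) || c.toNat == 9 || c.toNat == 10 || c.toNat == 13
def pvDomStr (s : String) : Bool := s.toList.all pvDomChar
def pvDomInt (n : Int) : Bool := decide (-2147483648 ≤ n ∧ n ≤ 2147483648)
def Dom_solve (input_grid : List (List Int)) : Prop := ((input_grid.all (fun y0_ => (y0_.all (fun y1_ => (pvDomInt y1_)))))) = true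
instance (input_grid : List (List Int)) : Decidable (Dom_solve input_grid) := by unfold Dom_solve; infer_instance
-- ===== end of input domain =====

-- B replaces A's per-cell four-neighbour check by two sweeps over adjacent pairs
-- (horizontal then vertical), marking both endpoints of each all-1 pair (objective: alternative).
-- Neither program mutates its argument; both read marks only from the input grid.

-- ===== PORT A =====
-- input_grid[r][c] read; indices are always in range on Pre_-admitted inputs (default 0 otherwise)
def gget (g : List (List Int)) (r c : Nat) : Int := (g.getD r []).getD c 0

-- output_grid[r][c] = 8 (a write into the copied grid)
def set8 (g : List (List Int)) (r c : Nat) : List (List Int) := g.modify r (fun row => row.set c 8)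

-- helper is_part_of_line, with `horizontal or vertical` flattened
def isPart (g : List (List Int)) (rows cols r c : Nat) : Bool :=
  ((decide (0 < c) && (gget g r (c - 1) == 1)) || (decide (c < cols - 1) && (gget g r (c + 1) == 1))) ||
  ((decide (0 < r) && (gget g (r - 1) c == 1)) || (decide (r < rows - 1) && (gget g (r + 1) c == 1)))

def solve (input_grid : List (List Int)) : List (List Int) :=
  let rows := input_grid.length
  let cols := (input_grid.headD []).length
  (List.range rows).foldl (fun out r =>
    (List.range cols).foldl (fun out c =>
      if gget input_grid r c == 1 && isPart input_grid rows cols r c then set8 out r c else out)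
      out) input_grid

-- ===== PORT B =====
def solve_alt (input_grid : List (List Int)) : List (List Int) :=
  let rows := input_grid.length
  let cols := (input_grid.headD []).length
  let h := (List.range rows).foldl (fun out r =>
    (List.range (cols - 1)).foldl (fun out c =>
      if gget input_grid r c == 1 && gget input_grid r (c + 1) == 1 then
        set8 (set8 out r c) r (c + 1) else out) out) input_grid
  (List.range (rows - 1)).foldl (fun out r =>
    (List.range cols).foldl (fun out c =>
      if gget input_grid r c == 1 && gget input_grid (r + 1) c == 1 then
        set8 (set8 out r c) (r + 1) c else out) out) h

-- ===== PRECONDITION & SPEC =====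
-- Pre_ excludes exactly the inputs on which A raises IndexError: the empty grid
-- (input_grid[0]) and grids with some row shorter than row 0 (input_grid[r][c] for c < cols).
def Pre_solve (input_grid : List (List Int)) : Prop :=
  input_grid ≠ [] ∧ ∀ row ∈ input_grid, (input_grid.headD []).length ≤ row.length
instance (input_grid : List (List Int)) : Decidable (Pre_solve input_grid) := by
  unfold Pre_solve; infer_instance

def pvWitness_solve : List (List Int) := [[1, 1, 0], [0, 1, 2]]

def Spec_solve (input_grid : List (List Int)) (out : List (List Int)) : Prop := out = solve_alt input_grid
instance (input_grid : List (List Int)) (out : List (List Int)) : Decidable (Spec_solve input_grid out) := by unfold Spec_solve; infer_instance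

-- ===== CLAIM (what is proved, stated in full; the proofs are below) =====
def Claim_equal_solve : Prop := ∀ (input_grid : List (List Int)), Dom_solve input_grid → Pre_solve input_grid → Spec_solve input_grid (solve input_grid)

-- ===== LEMMAS AND PROOFS =====


theorem getD_set8_length (g : List (List Int)) (r c r' : Nat) :
    ((set8 g r c).getD r' []).length = (g.getD r' []).length := by
  simp only [set8, List.getD_eq_getElem?_getD, List.getElem?_modify]
  cases h : g[r']? with
  | none => simp
  | some row => by_cases hr : r = r' <;> simp [hr]

theorem gget_set8 (g : List (List Int)) (r c r' c' : Nat) :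
    gget (set8 g r c) r' c' =
      if r = r' ∧ c = c' ∧ r < g.length ∧ c < (g.getD r []).length then 8 else gget g r' c' := by
  simp only [gget, set8, List.getD_eq_getElem?_getD, List.getElem?_modify]
  by_cases hr : r = r'
  · subst hr
    cases h : g[r]? with
    | none =>
      have : ¬ r < g.length := by simpa using List.getElem?_eq_none_iff.mp h
      simp [this]
    | some row =>
      have hlen : r < g.length := (List.getElem?_eq_some_iff.mp h).1
      by_cases hc : c = c'
      · subst hc
        by_cases hcl : c < row.length
        · simp [h, hlen, hcl, List.getD_eq_getElem?_getD, List.getElem?_set, hcl]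
        · simp [h, hlen, hcl, List.getD_eq_getElem?_getD, List.getElem?_set]
      · simp [h, hc, List.getD_eq_getElem?_getD, List.getElem?_set]
  · simp [hr]

def mark (g : List (List Int)) (ps : List (Nat × Nat)) : List (List Int) :=
  ps.foldl (fun out p => set8 out p.1 p.2) g

theorem length_set8 (g : List (List Int)) (r c : Nat) : (set8 g r c).length = g.length := by
  simp [set8]

theorem length_mark (g : List (List Int)) (ps : List (Nat × Nat)) :
    (mark g ps).length = g.length := by
  induction ps generalizing g with
  | nil => rfl
  | cons p ps ih =>
      show (mark (set8 g p.1 p.2) ps).length = g.length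
      rw [ih, length_set8]

theorem getD_mark_length (g : List (List Int)) (ps : List (Nat × Nat)) (r : Nat) :
    ((mark g ps).getD r []).length = (g.getD r []).length := by
  induction ps generalizing g with
  | nil => rfl
  | cons p ps ih =>
      show ((mark (set8 g p.1 p.2) ps).getD r []).length = _
      rw [ih, getD_set8_length]

theorem gget_mark (g : List (List Int)) (ps : List (Nat × Nat)) (r c : Nat) :
    gget (mark g ps) r c =
      if (r, c) ∈ ps ∧ r < g.length ∧ c < (g.getD r []).length then 8 else gget g r c := by
  induction ps generalizing g with
  | nil => simp [mark]
  | cons p ps ih =>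
      rcases p with ⟨pa, pb⟩
      show gget (mark (set8 g pa pb) ps) r c = _
      rw [ih, length_set8, getD_set8_length, gget_set8]
      simp only [List.mem_cons, Prod.mk.injEq]
      by_cases h1 : r < g.length <;> by_cases h2 : c < (g.getD r []).length <;>
        by_cases hm : (r, c) ∈ ps <;> by_cases ha : pa = r <;> by_cases hb : pb = c <;>
        subst_vars <;> (try simp_all) <;> simp_all [eq_comm]

theorem getD_getD_eq_gget (g : List (List Int)) (r c : Nat) :
    (g.getD r []).getD c 0 = gget g r c := rfl

theorem mark_ext (g : List (List Int)) (ps qs : List (Nat × Nat))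
    (h : ∀ r c, (r, c) ∈ ps ↔ (r, c) ∈ qs) : mark g ps = mark g qs := by
  have hl : (mark g ps).length = (mark g qs).length := by rw [length_mark, length_mark]
  apply List.ext_getElem hl
  intro i h1 h2
  have e1 : (mark g ps)[i] = (mark g ps).getD i [] := (List.getD_eq_getElem _ _ h1).symm
  have e2 : (mark g qs)[i] = (mark g qs).getD i [] := (List.getD_eq_getElem _ _ h2).symm
  rw [e1, e2]
  have hrl : ((mark g ps).getD i []).length = ((mark g qs).getD i []).length := by
    rw [getD_mark_length, getD_mark_length]
  apply List.ext_getElem hrl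
  intro j j1 j2
  have f1 : ((mark g ps).getD i [])[j] = ((mark g ps).getD i []).getD j 0 :=
    (List.getD_eq_getElem _ _ j1).symm
  have f2 : ((mark g qs).getD i [])[j] = ((mark g qs).getD i []).getD j 0 :=
    (List.getD_eq_getElem _ _ j2).symm
  rw [f1, f2, getD_getD_eq_gget, getD_getD_eq_gget, gget_mark, gget_mark]
  exact if_congr (and_congr_left fun _ => h i j) rfl rfl

theorem mark_append (g : List (List Int)) (ps qs : List (Nat × Nat)) :
    mark g (ps ++ qs) = mark (mark g ps) qs := by
  simp [mark, List.foldl_append]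

theorem foldl_if_mark (l : List Nat) (P : Nat → Bool) (F : Nat → List (Nat × Nat))
    (g : List (List Int)) :
    l.foldl (fun out i => if P i then mark out (F i) else out) g
      = mark g (l.flatMap (fun i => if P i then F i else [])) := by
  induction l generalizing g with
  | nil => rfl
  | cons a l ih =>
      simp only [List.foldl_cons, List.flatMap_cons, mark_append]
      by_cases h : P a = true
      · rw [if_pos h, if_pos h]; exact ih _
      · rw [if_neg h, if_neg h]; rw [ih]; rfl

theorem foldl_mark (l : List Nat) (F : Nat → List (Nat × Nat)) (g : List (List Int)) :
    l.foldl (fun out i => mark out (F i)) g = mark g (l.flatMap F) := by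
  induction l generalizing g with
  | nil => rfl
  | cons a l ih =>
      simp only [List.foldl_cons, List.flatMap_cons, mark_append]
      exact ih _

-- the write list of port A
def LA (g : List (List Int)) (rows cols : Nat) : List (Nat × Nat) :=
  (List.range rows).flatMap (fun r => (List.range cols).flatMap (fun c =>
    if gget g r c == 1 && isPart g rows cols r c then [(r, c)] else []))

-- the write lists of port B's two passes
def LH (g : List (List Int)) (rows cols : Nat) : List (Nat × Nat) :=
  (List.range rows).flatMap (fun r => (List.range (cols - 1)).flatMap (fun c =>
    if gget g r c == 1 && gget g r (c + 1) == 1 then [(r, c), (r, c + 1)] else []))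

def LV (g : List (List Int)) (rows cols : Nat) : List (Nat × Nat) :=
  (List.range (rows - 1)).flatMap (fun r => (List.range cols).flatMap (fun c =>
    if gget g r c == 1 && gget g (r + 1) c == 1 then [(r, c), (r + 1, c)] else []))

theorem solve_eq_mark (g : List (List Int)) :
    solve g = mark g (LA g g.length (g.headD []).length) := by
  show (List.range g.length).foldl (fun out r =>
      (List.range (g.headD []).length).foldl (fun out c =>
        if gget g r c == 1 && isPart g g.length (g.headD []).length r c then set8 out r c else out)
        out) g = _
  have hin : (fun (out : List (List Int)) (r : Nat) =>
      (List.range (g.headD []).length).foldl (fun out c =>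
        if gget g r c == 1 && isPart g g.length (g.headD []).length r c then set8 out r c else out)
        out)
      = (fun out r => mark out ((List.range (g.headD []).length).flatMap (fun c =>
          if gget g r c == 1 && isPart g g.length (g.headD []).length r c then [(r, c)] else []))) :=
    funext fun out => funext fun r => foldl_if_mark _ _ (fun c => [(r, c)]) out
  rw [hin]
  exact foldl_mark _ _ _

theorem solve_alt_eq_mark (g : List (List Int)) :
    solve_alt g = mark g (LH g g.length (g.headD []).length ++ LV g g.length (g.headD []).length) := by
  show (List.range (g.length - 1)).foldl (fun out r =>
      (List.range (g.headD []).length).foldl (fun out c =>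
        if gget g r c == 1 && gget g (r + 1) c == 1 then set8 (set8 out r c) (r + 1) c else out)
        out)
      ((List.range g.length).foldl (fun out r =>
        (List.range ((g.headD []).length - 1)).foldl (fun out c =>
          if gget g r c == 1 && gget g r (c + 1) == 1 then set8 (set8 out r c) r (c + 1) else out)
          out) g) = _
  rw [mark_append]
  have hH : (fun (out : List (List Int)) (r : Nat) =>
      (List.range ((g.headD []).length - 1)).foldl (fun out c =>
        if gget g r c == 1 && gget g r (c + 1) == 1 then set8 (set8 out r c) r (c + 1) else out)
        out)
      = (fun out r => mark out ((List.range ((g.headD []).length - 1)).flatMap (fun c =>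
          if gget g r c == 1 && gget g r (c + 1) == 1 then [(r, c), (r, c + 1)] else []))) :=
    funext fun out => funext fun r => foldl_if_mark _ _ (fun c => [(r, c), (r, c + 1)]) out
  have hV : (fun (out : List (List Int)) (r : Nat) =>
      (List.range (g.headD []).length).foldl (fun out c =>
        if gget g r c == 1 && gget g (r + 1) c == 1 then set8 (set8 out r c) (r + 1) c else out)
        out)
      = (fun out r => mark out ((List.range (g.headD []).length).flatMap (fun c =>
          if gget g r c == 1 && gget g (r + 1) c == 1 then [(r, c), (r + 1, c)] else []))) :=
    funext fun out => funext fun r => foldl_if_mark _ _ (fun c => [(r, c), (r + 1, c)]) out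
  rw [hH, hV, foldl_mark, foldl_mark]
  rfl

theorem memLA (g : List (List Int)) (rows cols r c : Nat) :
    (r, c) ∈ LA g rows cols ↔
      r < rows ∧ c < cols ∧ (gget g r c == 1 && isPart g rows cols r c) = true := by
  simp only [LA, List.mem_flatMap, List.mem_range]
  constructor
  · rintro ⟨a, ha, b, hb, hmem⟩
    by_cases hc : (gget g a b == 1 && isPart g rows cols a b) = true
    · rw [if_pos hc] at hmem
      simp only [List.mem_singleton, Prod.mk.injEq] at hmem
      obtain ⟨e1, e2⟩ := hmem; subst e1; subst e2
      exact ⟨ha, hb, hc⟩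
    · rw [if_neg hc] at hmem; simp at hmem
  · rintro ⟨h1, h2, h3⟩
    exact ⟨r, h1, c, h2, by rw [if_pos h3]; simp⟩

theorem memLH (g : List (List Int)) (rows cols r c : Nat) :
    (r, c) ∈ LH g rows cols ↔
      r < rows ∧ ∃ b, b < cols - 1 ∧ (gget g r b == 1 && gget g r (b + 1) == 1) = true ∧
        (c = b ∨ c = b + 1) := by
  simp only [LH, List.mem_flatMap, List.mem_range]
  constructor
  · rintro ⟨a, ha, b, hb, hmem⟩
    by_cases hc : (gget g a b == 1 && gget g a (b + 1) == 1) = true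
    · rw [if_pos hc] at hmem
      simp only [List.mem_cons, List.not_mem_nil, or_false] at hmem
      rcases hmem with he | he
      · have e1 : r = a := congrArg Prod.fst he
        have e2 : c = b := congrArg Prod.snd he
        subst e1; subst e2
        exact ⟨ha, c, hb, hc, Or.inl rfl⟩
      · have e1 : r = a := congrArg Prod.fst he
        have e2 : c = b + 1 := congrArg Prod.snd he
        subst e1; subst e2
        exact ⟨ha, b, hb, hc, Or.inr rfl⟩
    · rw [if_neg hc] at hmem; simp at hmem
  · rintro ⟨h1, b, hb, hc, hd⟩
    refine ⟨r, h1, b, hb, ?_⟩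
    rw [if_pos hc]
    rcases hd with e | e <;> subst e <;> simp

theorem memLV (g : List (List Int)) (rows cols r c : Nat) :
    (r, c) ∈ LV g rows cols ↔
      c < cols ∧ ∃ a, a < rows - 1 ∧ (gget g a c == 1 && gget g (a + 1) c == 1) = true ∧
        (r = a ∨ r = a + 1) := by
  simp only [LV, List.mem_flatMap, List.mem_range]
  constructor
  · rintro ⟨a, ha, b, hb, hmem⟩
    by_cases hc : (gget g a b == 1 && gget g (a + 1) b == 1) = true
    · rw [if_pos hc] at hmem
      simp only [List.mem_cons, List.not_mem_nil, or_false] at hmem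
      rcases hmem with he | he
      · have e1 : r = a := congrArg Prod.fst he
        have e2 : c = b := congrArg Prod.snd he
        subst e1; subst e2
        exact ⟨hb, r, ha, hc, Or.inl rfl⟩
      · have e1 : r = a + 1 := congrArg Prod.fst he
        have e2 : c = b := congrArg Prod.snd he
        subst e1; subst e2
        exact ⟨hb, a, ha, hc, Or.inr rfl⟩
    · rw [if_neg hc] at hmem; simp at hmem
  · rintro ⟨h1, a, ha, hc, hd⟩
    refine ⟨a, ha, c, h1, ?_⟩
    rw [if_pos hc]
    rcases hd with e | e <;> subst e <;> simp

theorem cond_iff (g : List (List Int)) (rows cols r c : Nat) :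
    (r, c) ∈ LA g rows cols ↔ (r, c) ∈ LH g rows cols ++ LV g rows cols := by
  rw [List.mem_append, memLA, memLH, memLV]
  simp only [isPart, Bool.and_eq_true, Bool.or_eq_true, decide_eq_true_eq, beq_iff_eq]
  constructor
  · rintro ⟨hr, hc, h1, hpart⟩
    rcases hpart with (⟨hgt, hl⟩ | ⟨hlt, hrt⟩) | (⟨hgt, hu⟩ | ⟨hlt, hd⟩)
    · refine Or.inl ⟨hr, c - 1, by omega, ⟨hl, ?_⟩, Or.inr (by omega)⟩
      have e : c - 1 + 1 = c := by omega
      rw [e]; exact h1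
    · exact Or.inl ⟨hr, c, by omega, ⟨h1, hrt⟩, Or.inl rfl⟩
    · refine Or.inr ⟨hc, r - 1, by omega, ⟨hu, ?_⟩, Or.inr (by omega)⟩
      have e : r - 1 + 1 = r := by omega
      rw [e]; exact h1
    · exact Or.inr ⟨hc, r, by omega, ⟨h1, hd⟩, Or.inl rfl⟩
  · rintro (⟨hr, b, hb, ⟨h1, h2⟩, hd | hd⟩ | ⟨hcc, a, ha, ⟨h1, h2⟩, hd | hd⟩)
    · subst hd
      exact ⟨hr, by omega, h1, Or.inl (Or.inr ⟨by omega, h2⟩)⟩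
    · subst hd
      refine ⟨hr, by omega, h2, Or.inl (Or.inl ⟨by omega, ?_⟩)⟩
      have e : b + 1 - 1 = b := by omega
      rw [e]; exact h1
    · subst hd
      exact ⟨by omega, hcc, h1, Or.inr (Or.inr ⟨by omega, h2⟩)⟩
    · subst hd
      refine ⟨by omega, hcc, h2, Or.inr (Or.inl ⟨by omega, ?_⟩)⟩
      have e : a + 1 - 1 = a := by omega
      rw [e]; exact h1

-- ===== VERDICT (by name: the statement is the Claim_ definition above) =====
theorem solve_spec : Claim_equal_solve := by
  intro g _ _
  show solve g = solve_alt g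
  rw [solve_eq_mark, solve_alt_eq_mark]
  exact mark_ext _ _ _ (fun r c => cond_iff g g.length (g.headD []).length r c)
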